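-- pv_equiv track=rewrite | github.com/Gyeol0/TIL | Algorithm/List_practice/4836. 색칠하기.py | Painting
-- ===== SOURCE A (Python) =====
-- def Painting(N, squares, k):
--     count = 0
--     # 면적 초기화
--     arr = [[0]*k for _ in range(k)]
--     for i in range(k):
--         for j in range(k):
--             for p in squares:
--                 # 정사각형 내부에 있는지 확인
--                 if p[0] <= i <= p[2] and p[1] <= j <= p[3]:
--                     # 아무 색도 칠하지 않았으면 색칠
--                     if arr[i][j] == 0:
--                         arr[i][j] = p[4]
--                     # 덧칠했을 때 보라색인지 확인
--                     elif arr[i][j] + p[4] == 3: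
--                         count += 1
--     return count
-- ===== SOURCE B (Python) =====
-- def Painting(N, squares, k):
--     if k <= 0:
--         return 0
--     count = 0
--     arr = [[0] * k for _ in range(k)]
--     for p in squares:
--         for i in range(max(p[0], 0), min(p[2], k - 1) + 1):
--             for j in range(max(p[1], 0), min(p[3], k - 1) + 1):
--                 if arr[i][j] == 0:
--                     arr[i][j] = p[4]
--                 elif arr[i][j] + p[4] == 3:
--                     count += 1
--     return count
-- ===== Notes on version B (the rewrite author's own statement) =====
-- stated objective: faster
-- what changed: B inverts the loop nesting: instead of visiting every grid cell and scanning the whole square list per cell, it walks the squares once in list order and touches only the cells inside each square's (clamped) rectangle (returning 0 at once for an empty grid), so the per-cell scan over all squares disappears and total work is proportional to the painted area.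
-- outside the precondition, e.g. on Painting(0, [[5]], 2): A returns 0, B raises IndexError
import Mathlib
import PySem

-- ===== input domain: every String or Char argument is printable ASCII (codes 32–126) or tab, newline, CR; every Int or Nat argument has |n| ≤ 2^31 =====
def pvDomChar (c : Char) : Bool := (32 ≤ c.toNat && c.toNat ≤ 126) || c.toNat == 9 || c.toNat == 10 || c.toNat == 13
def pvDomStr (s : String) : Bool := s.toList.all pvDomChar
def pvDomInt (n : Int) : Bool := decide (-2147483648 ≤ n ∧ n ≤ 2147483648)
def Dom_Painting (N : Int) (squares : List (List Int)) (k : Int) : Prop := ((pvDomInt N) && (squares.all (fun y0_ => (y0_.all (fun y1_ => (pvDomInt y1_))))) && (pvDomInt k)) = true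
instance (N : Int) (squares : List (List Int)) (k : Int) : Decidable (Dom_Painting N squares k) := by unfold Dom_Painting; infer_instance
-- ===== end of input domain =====

-- B inverts the loop nesting: the squares are the outer loop and only the cells of each
-- square's clamped rectangle are visited, so the per-cell scan over all squares disappears.

-- ===== PORT A =====
-- element access p[n] / arr[i] / arr[i][j] via PySem.List.pyGetD / pySetD: exact under
-- Pre_Painting (every index either port reaches is then in range)
def pvGet (p : List Int) (n : Int) : Int := PySem.List.pyGetD p n 0

-- the guard  p[0] <= i <= p[2] and p[1] <= j <= p[3]  of A
def pvCovers (p : List Int) (i j : Int) : Bool :=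
  decide (pvGet p 0 ≤ i) && decide (i ≤ pvGet p 2) && decide (pvGet p 1 ≤ j) && decide (j ≤ pvGet p 3)

-- arr[i][j]  and  arr[i][j] = v  on the grid
def pvGetC (arr : List (List Int)) (i j : Int) : Int :=
  PySem.List.pyGetD (PySem.List.pyGetD arr i []) j 0

def pvSetC (arr : List (List Int)) (i j : Int) (v : Int) : List (List Int) :=
  PySem.List.pySetD arr i (PySem.List.pySetD (PySem.List.pyGetD arr i []) j v)

-- one step of A's innermost 'for p in squares' loop at cell (i, j); state = (count, arr)
def pvStepA (i j : Int) (st : Int × List (List Int)) (p : List Int) : Int × List (List Int) :=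
  if pvCovers p i j then
    if pvGetC st.2 i j == 0 then (st.1, pvSetC st.2 i j (pvGet p 4))
    else if pvGetC st.2 i j + pvGet p 4 == 3 then (st.1 + 1, st.2)
    else st
  else st

def Painting (N : Int) (squares : List (List Int)) (k : Int) : Int :=
  -- arr = [[0]*k for _ in range(k)]   ([0]*k = List.replicate k.toNat 0: empty for k ≤ 0, as in Python)
  let arr : List (List Int) := (PySem.List.pyRange 0 k 1).map (fun _ => List.replicate k.toNat (0 : Int))
  ((PySem.List.pyRange 0 k 1).foldl (fun st i =>
    (PySem.List.pyRange 0 k 1).foldl (fun st j =>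
      squares.foldl (pvStepA i j) st) st) ((0 : Int), arr)).1

-- ===== PORT B =====
-- B's body for one square p: iterate i over range(max(p[0],0), min(p[2],k-1)+1) and j over
-- range(max(p[1],0), min(p[3],k-1)+1), painting/counting on the shared grid
def pvStepB (k : Int) (st : Int × List (List Int)) (p : List Int) : Int × List (List Int) :=
  (PySem.List.pyRange (max (pvGet p 0) 0) (min (pvGet p 2) (k - 1) + 1) 1).foldl (fun st i =>
    (PySem.List.pyRange (max (pvGet p 1) 0) (min (pvGet p 3) (k - 1) + 1) 1).foldl (fun st j =>
      if pvGetC st.2 i j == 0 then (st.1, pvSetC st.2 i j (pvGet p 4))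
      else if pvGetC st.2 i j + pvGet p 4 == 3 then (st.1 + 1, st.2)
      else st) st) st

def Painting_alt (N : Int) (squares : List (List Int)) (k : Int) : Int :=
  if k ≤ 0 then 0
  else
    let arr : List (List Int) := (PySem.List.pyRange 0 k 1).map (fun _ => List.replicate k.toNat (0 : Int))
    (squares.foldl (pvStepB k) ((0 : Int), arr)).1

-- ===== PRECONDITION & SPEC =====
-- Pre_ admits k ≤ 0 (empty grid: neither program touches the squares' entries) and, for
-- k > 0, squares that are either complete (length ≥ 5) or short with an empty clamped
-- rectangle.  It is slightly narrower than A's raising behaviour: on a short square whose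
-- bounds A's short-circuit guard never reads, A still returns, while B computes its loop
-- bounds eagerly and raises IndexError there (see the cite in claim.json).
def Pre_Painting (N : Int) (squares : List (List Int)) (k : Int) : Prop :=
  k ≤ 0 ∨ ∀ p ∈ squares, 4 < p.length
    ∨ (2 < p.length ∧ min (p.getD 2 0) (k - 1) < max (p.getD 0 0) 0)
    ∨ (3 < p.length ∧ min (p.getD 3 0) (k - 1) < max (p.getD 1 0) 0)
instance (N : Int) (squares : List (List Int)) (k : Int) : Decidable (Pre_Painting N squares k) := by
  unfold Pre_Painting; infer_instance

def pvWitness_Painting : Int × List (List Int) × Int := (0, [[0, 0, 1, 1, 1], [0, 0, 1, 1, 2]], 2)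

def Spec_Painting (N : Int) (squares : List (List Int)) (k : Int) (out : Int) : Prop := out = Painting_alt N squares k
instance (N : Int) (squares : List (List Int)) (k : Int) (out : Int) : Decidable (Spec_Painting N squares k out) := by unfold Spec_Painting; infer_instance

-- ===== CLAIM (what is proved, stated in full; the proofs are below) =====
def Claim_equal_Painting : Prop := ∀ (N : Int) (squares : List (List Int)) (k : Int), Dom_Painting N squares k → Pre_Painting N squares k → Spec_Painting N squares k (Painting N squares k)

-- ===== LEMMAS AND PROOFS =====

-- A's per-square step at one cell, the grid replaced by the single value it touches
def pvCellStep (i j : Int) (st : Int × Int) (p : List Int) : Int × Int :=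
  if pvCovers p i j then
    if st.2 == 0 then (st.1, pvGet p 4)
    else if st.2 + pvGet p 4 == 3 then (st.1 + 1, st.2)
    else st
  else st

-- count increment / colour update of one square at one cell
def pvInc (v c : Int) : Int := if v = 0 then 0 else if v + c = 3 then 1 else 0
def pvUpd (v c : Int) : Int := if v = 0 then c else v
def pvIncC (p : List Int) (i j v : Int) : Int := if pvCovers p i j then pvInc v (pvGet p 4) else 0
def pvUpdC (p : List Int) (i j v : Int) : Int := if pvCovers p i j then pvUpd v (pvGet p 4) else v

-- per-cell accumulated count / final colour over a square list, from initial colour v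
def pvCnt (i j : Int) : List (List Int) → Int → Int
  | [], _ => 0
  | p :: l, v => pvIncC p i j v + pvCnt i j l (pvUpdC p i j v)
def pvClr (i j : Int) : List (List Int) → Int → Int
  | [], v => v
  | p :: l, v => pvClr i j l (pvUpdC p i j v)

theorem pv_cellstep_eq (i j c v : Int) (p : List Int) :
    pvCellStep i j (c, v) p = (c + pvIncC p i j v, pvUpdC p i j v) := by
  simp only [pvCellStep, pvIncC, pvUpdC, pvInc, pvUpd]
  split_ifs <;> simp_all

theorem pv_foldl_cell (i j : Int) :
    ∀ (l : List (List Int)) (c v : Int),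
    l.foldl (pvCellStep i j) (c, v) = (c + pvCnt i j l v, pvClr i j l v) := by
  intro l
  induction l with
  | nil => intro c v; simp [pvCnt, pvClr]
  | cons p l ih =>
    intro c v
    simp only [List.foldl_cons, pv_cellstep_eq, ih, pvCnt, pvClr]
    rw [Prod.mk.injEq]
    exact ⟨by ring, rfl⟩

def pvShape (arr : List (List Int)) (k : Int) : Prop :=
  arr.length = k.toNat ∧ ∀ row ∈ arr, row.length = k.toNat

theorem pv_shape_set (arr : List (List Int)) (k i j v : Int) (h : pvShape arr k)
    (hi0 : 0 ≤ i) (hik : i < k) :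
    pvShape (pvSetC arr i j v) k := by
  obtain ⟨hlen, hrow⟩ := h
  unfold pvSetC
  rw [PySem.List.pySetD_of_nonneg _ _ hi0]
  constructor
  · simpa using hlen
  · intro row hr
    rcases List.mem_or_eq_of_mem_set hr with hmem | heq
    · exact hrow _ hmem
    · subst heq
      rw [PySem.List.length_pySetD, PySem.List.pyGetD_eq_getElem _ _ hi0 (by omega)]
      exact hrow _ (List.getElem_mem _)

theorem pv_get_set_self (arr : List (List Int)) (k i j v : Int) (h : pvShape arr k)
    (hi0 : 0 ≤ i) (hik : i < k) (hj0 : 0 ≤ j) (hjk : j < k) :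
    pvGetC (pvSetC arr i j v) i j = v := by
  obtain ⟨hlen, hrow⟩ := h
  have hrl : (PySem.List.pyGetD arr i []).length = k.toNat := by
    rw [PySem.List.pyGetD_eq_getElem _ _ hi0 (by omega)]
    exact hrow _ (List.getElem_mem _)
  unfold pvGetC pvSetC
  rw [PySem.List.pySetD_of_nonneg _ _ hi0, PySem.List.pySetD_of_nonneg _ _ hj0,
      PySem.List.pyGetD_eq_getElem _ _ hi0 (by simp; omega),
      List.getElem_set_self,
      PySem.List.pyGetD_eq_getElem _ _ hj0 (by simp [hrl]; omega),
      List.getElem_set_self]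

theorem pv_set_get (arr : List (List Int)) (k i j : Int) (h : pvShape arr k)
    (hi0 : 0 ≤ i) (hik : i < k) (hj0 : 0 ≤ j) (hjk : j < k) :
    pvSetC arr i j (pvGetC arr i j) = arr := by
  obtain ⟨hlen, hrow⟩ := h
  have hrl : (PySem.List.pyGetD arr i []).length = k.toNat := by
    rw [PySem.List.pyGetD_eq_getElem _ _ hi0 (by omega)]
    exact hrow _ (List.getElem_mem _)
  unfold pvGetC pvSetC
  rw [PySem.List.pySetD_of_nonneg _ _ hi0, PySem.List.pySetD_of_nonneg _ _ hj0,
      PySem.List.pyGetD_eq_getElem _ _ hj0 (by omega),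
      List.set_getElem_self,
      PySem.List.pyGetD_eq_getElem _ _ hi0 (by omega),
      List.set_getElem_self]

theorem pv_set_set (arr : List (List Int)) (k i j v w : Int) (h : pvShape arr k)
    (hi0 : 0 ≤ i) (hik : i < k) (hj0 : 0 ≤ j) (hjk : j < k) :
    pvSetC (pvSetC arr i j v) i j w = pvSetC arr i j w := by
  obtain ⟨hlen, hrow⟩ := h
  have hrl : (PySem.List.pyGetD arr i []).length = k.toNat := by
    rw [PySem.List.pyGetD_eq_getElem _ _ hi0 (by omega)]
    exact hrow _ (List.getElem_mem _)
  unfold pvSetC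
  rw [PySem.List.pySetD_of_nonneg _ _ hi0, PySem.List.pySetD_of_nonneg _ _ hi0,
      PySem.List.pySetD_of_nonneg _ _ hj0, PySem.List.pySetD_of_nonneg _ _ hj0,
      PySem.List.pySetD_of_nonneg _ _ hj0,
      PySem.List.pyGetD_eq_getElem (arr.set i.toNat _) _ hi0 (by simp; omega),
      List.getElem_set_self, List.set_set, List.set_set,
      PySem.List.pySetD_of_nonneg _ _ hi0]

theorem pv_row_other (arr : List (List Int)) (i j v : Int)
    (hi0 : 0 ≤ i) (i' : Int) (hne : i' ≠ i) (hi'0 : 0 ≤ i') :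
    PySem.List.pyGetD (pvSetC arr i j v) i' [] = PySem.List.pyGetD arr i' [] := by
  unfold pvSetC
  rw [PySem.List.pySetD_of_nonneg _ _ hi0,
      PySem.List.pyGetD_of_nonneg _ _ hi'0, PySem.List.pyGetD_of_nonneg _ _ hi'0,
      List.getD_eq_getElem?_getD, List.getD_eq_getElem?_getD,
      List.getElem?_set_ne (by omega)]

theorem pv_get_other_col (arr : List (List Int)) (k i j v : Int) (h : pvShape arr k)
    (hi0 : 0 ≤ i) (hik : i < k) (hj0 : 0 ≤ j)
    (j' : Int) (hj'0 : 0 ≤ j') (hne : j' ≠ j) :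
    pvGetC (pvSetC arr i j v) i j' = pvGetC arr i j' := by
  obtain ⟨hlen, hrow⟩ := h
  have hrl : (PySem.List.pyGetD arr i []).length = k.toNat := by
    rw [PySem.List.pyGetD_eq_getElem _ _ hi0 (by omega)]
    exact hrow _ (List.getElem_mem _)
  unfold pvGetC pvSetC
  rw [PySem.List.pySetD_of_nonneg _ _ hi0, PySem.List.pySetD_of_nonneg _ _ hj0,
      PySem.List.pyGetD_eq_getElem (arr.set _ _) _ hi0 (by simp; omega),
      List.getElem_set_self,
      PySem.List.pyGetD_of_nonneg _ _ hj'0, PySem.List.pyGetD_of_nonneg _ _ hj'0,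
      List.getD_eq_getElem?_getD, List.getD_eq_getElem?_getD,
      List.getElem?_set_ne (by omega),
      PySem.List.pyGetD_eq_getElem _ _ hi0 (by omega)]

-- ---------- A side: the grid fold at one cell simulates the abstract per-cell fold ----------
theorem pv_sim (i j k : Int) (squares : List (List Int)) :
    ∀ (cnt : Int) (arr : List (List Int)), pvShape arr k →
    0 ≤ i → i < k → 0 ≤ j → j < k →
    squares.foldl (pvStepA i j) (cnt, arr)
      = ((squares.foldl (pvCellStep i j) (cnt, pvGetC arr i j)).1,
         pvSetC arr i j (squares.foldl (pvCellStep i j) (cnt, pvGetC arr i j)).2) := by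
  induction squares with
  | nil =>
    intro cnt arr hsh hi0 hik hj0 hjk
    simp [pv_set_get arr k i j hsh hi0 hik hj0 hjk]
  | cons p ps ih =>
    intro cnt arr hsh hi0 hik hj0 hjk
    simp only [List.foldl_cons]
    by_cases hc : pvCovers p i j
    · by_cases hz : pvGetC arr i j = 0
      · have hstep : pvStepA i j (cnt, arr) p = (cnt, pvSetC arr i j (pvGet p 4)) := by
          simp [pvStepA, hc, hz]
        have hcell : pvCellStep i j (cnt, pvGetC arr i j) p = (cnt, pvGet p 4) := by
          simp [pvCellStep, hc, hz]
        rw [hstep, hcell,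
            ih cnt (pvSetC arr i j (pvGet p 4)) (pv_shape_set arr k i j _ hsh hi0 hik) hi0 hik hj0 hjk,
            pv_get_set_self arr k i j _ hsh hi0 hik hj0 hjk,
            pv_set_set arr k i j _ _ hsh hi0 hik hj0 hjk]
      · by_cases h3 : pvGetC arr i j + pvGet p 4 = 3
        · have hstep : pvStepA i j (cnt, arr) p = (cnt + 1, arr) := by simp [pvStepA, hc, hz, h3]
          have hcell : pvCellStep i j (cnt, pvGetC arr i j) p = (cnt + 1, pvGetC arr i j) := by
            simp [pvCellStep, hc, hz, h3]
          rw [hstep, hcell, ih _ _ hsh hi0 hik hj0 hjk]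
        · have hstep : pvStepA i j (cnt, arr) p = (cnt, arr) := by simp [pvStepA, hc, hz, h3]
          have hcell : pvCellStep i j (cnt, pvGetC arr i j) p = (cnt, pvGetC arr i j) := by
            simp [pvCellStep, hc, hz, h3]
          rw [hstep, hcell, ih _ _ hsh hi0 hik hj0 hjk]
    · have hstep : pvStepA i j (cnt, arr) p = (cnt, arr) := by simp [pvStepA, hc]
      have hcell : pvCellStep i j (cnt, pvGetC arr i j) p = (cnt, pvGetC arr i j) := by
        simp [pvCellStep, hc]
      rw [hstep, hcell, ih _ _ hsh hi0 hik hj0 hjk]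

-- A's inner loop over j: row i gets written, all other rows survive unchanged
theorem pv_inner (squares : List (List Int)) (i k : Int) :
    ∀ (J : List Int) (cnt : Int) (arr : List (List Int)),
    pvShape arr k → 0 ≤ i → i < k → J.Nodup →
    (∀ j ∈ J, 0 ≤ j ∧ j < k) → (∀ j ∈ J, pvGetC arr i j = 0) →
    ∃ arr', (J.foldl (fun st j => squares.foldl (pvStepA i j) st) (cnt, arr)
        = (J.foldl (fun t j => t + pvCnt i j squares 0) cnt, arr'))
      ∧ pvShape arr' k
      ∧ (∀ i', i' ≠ i → 0 ≤ i' → PySem.List.pyGetD arr' i' [] = PySem.List.pyGetD arr i' []) := by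
  intro J
  induction J with
  | nil =>
    intro cnt arr hsh _ _ _ _ _
    exact ⟨arr, rfl, hsh, fun _ _ _ => rfl⟩
  | cons j J' ih =>
    intro cnt arr hsh hi0 hik hnd hb hz
    have hj := hb j (by simp)
    simp only [List.foldl_cons]
    rw [pv_sim i j k squares cnt arr hsh hi0 hik hj.1 hj.2, hz j (by simp),
        pv_foldl_cell i j squares cnt 0]
    have hsh' := pv_shape_set arr k i j (pvClr i j squares 0) hsh hi0 hik
    obtain ⟨arr', he, hsh'', hrows⟩ := ih (cnt + pvCnt i j squares 0)
      (pvSetC arr i j (pvClr i j squares 0)) hsh' hi0 hik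
      (List.nodup_cons.mp hnd).2
      (fun j' hj' => hb j' (by simp [hj']))
      (fun j' hj' => by
        rw [pv_get_other_col arr k i j _ hsh hi0 hik hj.1 j' (hb j' (by simp [hj'])).1
            (by intro heq; exact (List.nodup_cons.mp hnd).1 (heq ▸ hj'))]
        exact hz j' (by simp [hj']))
    exact ⟨arr', he, hsh'', fun i' hne hi'0 => by
      rw [hrows i' hne hi'0, pv_row_other arr i j _ hi0 i' hne hi'0]⟩

-- A's outer loop over i
theorem pv_outer (squares : List (List Int)) (k : Int) :
    ∀ (I : List Int) (cnt : Int) (arr : List (List Int)),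
    pvShape arr k → I.Nodup → (∀ i ∈ I, 0 ≤ i ∧ i < k) →
    (∀ i ∈ I, ∀ j, 0 ≤ j → j < k → pvGetC arr i j = 0) →
    (I.foldl (fun st i => (PySem.List.pyRange 0 k 1).foldl (fun st j => squares.foldl (pvStepA i j) st) st) (cnt, arr)).1
      = I.foldl (fun t i => (PySem.List.pyRange 0 k 1).foldl (fun t j => t + pvCnt i j squares 0) t) cnt := by
  intro I
  induction I with
  | nil => intros; rfl
  | cons i I' ih =>
    intro cnt arr hsh hnd hb hz
    have hi := hb i (by simp)
    simp only [List.foldl_cons]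
    obtain ⟨arr', he, hsh', hrows⟩ := pv_inner squares i k (PySem.List.pyRange 0 k 1) cnt arr
      hsh hi.1 hi.2 (PySem.List.nodup_pyRange_one 0 k)
      (fun j hj => by have := PySem.List.mem_pyRange_one.mp hj; exact ⟨this.1, this.2⟩)
      (fun j hj => by
        have := PySem.List.mem_pyRange_one.mp hj
        exact hz i (by simp) j this.1 this.2)
    rw [he]
    apply ih _ _ hsh' (List.nodup_cons.mp hnd).2 (fun i' h => hb i' (by simp [h]))
    intro i' hmem j hj0 hjk
    have hne : i' ≠ i := fun heq => (List.nodup_cons.mp hnd).1 (heq ▸ hmem)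
    have hg : pvGetC arr' i' j = pvGetC arr i' j := by
      unfold pvGetC
      rw [hrows i' hne (hb i' (by simp [hmem])).1]
    rw [hg]
    exact hz i' (by simp [hmem]) j hj0 hjk

-- ---------- sum toolbox ----------
theorem pv_sum_map_add (l : List Int) (f g : Int → Int) :
    (l.map (fun x => f x + g x)).sum = (l.map f).sum + (l.map g).sum := by
  induction l with
  | nil => simp
  | cons a l ih => simp [ih]; ring

theorem pv_sum_map_ite (l : List Int) (c : Int → Bool) (f : Int → Int) :
    (l.map (fun x => if c x then f x else 0)).sum = ((l.filter c).map f).sum := by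
  induction l with
  | nil => simp
  | cons a l ih =>
    by_cases h : c a <;> simp [h, ih]

theorem pv_grid2 (l m : List Int) (h : Int → Int → Int) (c : Int) :
    l.foldl (fun t i => m.foldl (fun t j => t + h i j) t) c
      = c + (l.map (fun i => (m.map (h i)).sum)).sum := by
  induction l generalizing c with
  | nil => simp
  | cons a l ih =>
    simp only [List.foldl_cons]
    rw [PySem.List.foldl_add, ih]
    simp only [List.map_cons, List.sum_cons]
    ring

theorem pv_range_clamp (k lo hi : Int) (f : Int → Int) :
    ((PySem.List.pyRange (max lo 0) (min hi (k - 1) + 1) 1).map f).sum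
      = ((PySem.List.pyRange 0 k 1).map (fun x => if lo ≤ x ∧ x ≤ hi then f x else 0)).sum := by
  have h1 : (fun x => if lo ≤ x ∧ x ≤ hi then f x else (0 : Int))
      = (fun x => if (decide (lo ≤ x ∧ x ≤ hi)) = true then f x else 0) := by
    funext x; simp
  rw [h1, pv_sum_map_ite (PySem.List.pyRange 0 k 1) (fun x => decide (lo ≤ x ∧ x ≤ hi)) f]
  have hperm : List.Perm ((PySem.List.pyRange 0 k 1).filter (fun x => decide (lo ≤ x ∧ x ≤ hi)))
      (PySem.List.pyRange (max lo 0) (min hi (k - 1) + 1) 1) := by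
    rw [List.perm_ext_iff_of_nodup ((PySem.List.nodup_pyRange_one 0 k).filter _)
        (PySem.List.nodup_pyRange_one _ _)]
    intro x
    simp only [List.mem_filter, PySem.List.mem_pyRange_one, decide_eq_true_eq]
    omega
  rw [(hperm.map f).sum_eq]

-- ---------- B side ----------
theorem pvB_inner (p : List Int) (i k : Int) :
    ∀ (J : List Int) (cnt : Int) (arr : List (List Int)),
    pvShape arr k → 0 ≤ i → i < k → J.Nodup → (∀ j ∈ J, 0 ≤ j ∧ j < k) →
    ∃ arr',
      (J.foldl (fun st j =>
          if pvGetC st.2 i j == 0 then (st.1, pvSetC st.2 i j (pvGet p 4))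
          else if pvGetC st.2 i j + pvGet p 4 == 3 then (st.1 + 1, st.2)
          else st) (cnt, arr)
        = (J.foldl (fun t j => t + pvInc (pvGetC arr i j) (pvGet p 4)) cnt, arr'))
      ∧ pvShape arr' k
      ∧ (∀ i', i' ≠ i → 0 ≤ i' → PySem.List.pyGetD arr' i' [] = PySem.List.pyGetD arr i' [])
      ∧ (∀ j', 0 ≤ j' → j' < k →
          pvGetC arr' i j' = if j' ∈ J then pvUpd (pvGetC arr i j') (pvGet p 4) else pvGetC arr i j') := by
  intro J
  induction J with
  | nil =>
    intro cnt arr hsh _ _ _ _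
    exact ⟨arr, rfl, hsh, fun _ _ _ => rfl, fun j' _ _ => by simp⟩
  | cons j J' ih =>
    intro cnt arr hsh hi0 hik hnd hb
    have hj := hb j (by simp)
    have hnd' := List.nodup_cons.mp hnd
    simp only [List.foldl_cons]
    by_cases hz : pvGetC arr i j = 0
    · have hstep : (if pvGetC arr i j == 0 then (cnt, pvSetC arr i j (pvGet p 4))
          else if pvGetC arr i j + pvGet p 4 == 3 then (cnt + 1, arr) else (cnt, arr))
          = (cnt, pvSetC arr i j (pvGet p 4)) := by simp [hz]
      rw [hstep]
      have hsh1 := pv_shape_set arr k i j (pvGet p 4) hsh hi0 hik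
      obtain ⟨arr', he, hsh', hrows, hcells⟩ := ih cnt (pvSetC arr i j (pvGet p 4)) hsh1 hi0 hik
        hnd'.2 (fun j' hj' => hb j' (by simp [hj']))
      refine ⟨arr', ?_, hsh', ?_, ?_⟩
      · rw [he]
        have hcnt : J'.foldl (fun t j'' => t + pvInc (pvGetC (pvSetC arr i j (pvGet p 4)) i j'') (pvGet p 4)) cnt
            = J'.foldl (fun t j'' => t + pvInc (pvGetC arr i j'') (pvGet p 4)) (cnt + pvInc (pvGetC arr i j) (pvGet p 4)) := by
          rw [show cnt + pvInc (pvGetC arr i j) (pvGet p 4) = cnt by simp [pvInc, hz]]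
          apply PySem.List.foldl_congr_mem
          intro acc x hx
          rw [pv_get_other_col arr k i j _ hsh hi0 hik hj.1 x (hb x (by simp [hx])).1
              (fun heq => hnd'.1 (heq ▸ hx))]
        rw [hcnt]
      · intro i' hne hi'0
        rw [hrows i' hne hi'0, pv_row_other arr i j _ hi0 i' hne hi'0]
      · intro j' hj'0 hj'k
        rw [hcells j' hj'0 hj'k]
        by_cases hmem : j' ∈ J'
        · have hne : j' ≠ j := fun heq => hnd'.1 (heq ▸ hmem)
          rw [if_pos hmem, if_pos (by simp [hmem]),
              pv_get_other_col arr k i j _ hsh hi0 hik hj.1 j' hj'0 hne]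
        · by_cases hjj : j' = j
          · subst hjj
            rw [if_neg hmem, if_pos (by simp),
                pv_get_set_self arr k i j' _ hsh hi0 hik hj'0 hj'k]
            simp [pvUpd, hz]
          · rw [if_neg hmem, if_neg (by simp [hjj, hmem]),
                pv_get_other_col arr k i j _ hsh hi0 hik hj.1 j' hj'0 hjj]
    · have hstep : (if pvGetC arr i j == 0 then (cnt, pvSetC arr i j (pvGet p 4))
          else if pvGetC arr i j + pvGet p 4 == 3 then (cnt + 1, arr) else (cnt, arr))
          = (cnt + pvInc (pvGetC arr i j) (pvGet p 4), arr) := by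
        by_cases h3 : pvGetC arr i j + pvGet p 4 = 3 <;> simp [hz, h3, pvInc]
      rw [hstep]
      obtain ⟨arr', he, hsh', hrows, hcells⟩ := ih (cnt + pvInc (pvGetC arr i j) (pvGet p 4)) arr hsh hi0 hik
        hnd'.2 (fun j' hj' => hb j' (by simp [hj']))
      refine ⟨arr', he, hsh', hrows, ?_⟩
      intro j' hj'0 hj'k
      rw [hcells j' hj'0 hj'k]
      by_cases hmem : j' ∈ J'
      · simp [hmem]
      · by_cases hjj : j' = j
        · subst hjj
          simp [hmem, pvUpd, hz]
        · have : j' ∉ (j :: J') := by simp [hjj, hmem]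
          simp [hmem, this]


theorem pv_covers_iff (p : List Int) (i j : Int) :
    pvCovers p i j = true ↔ (pvGet p 0 ≤ i ∧ i ≤ pvGet p 2) ∧ (pvGet p 1 ≤ j ∧ j ≤ pvGet p 3) := by
  simp [pvCovers]; tauto

theorem pvIncC_eq (p : List Int) (i j v : Int) :
    pvIncC p i j v
      = if pvGet p 0 ≤ i ∧ i ≤ pvGet p 2 then
          (if pvGet p 1 ≤ j ∧ j ≤ pvGet p 3 then pvInc v (pvGet p 4) else 0)
        else 0 := by
  unfold pvIncC
  by_cases hr : pvGet p 0 ≤ i ∧ i ≤ pvGet p 2 <;>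
    by_cases hc : pvGet p 1 ≤ j ∧ j ≤ pvGet p 3 <;>
      simp [hr, hc, pv_covers_iff]

-- B's loop over the rows of p's clamped rectangle
theorem pvB_outer (k : Int) (p : List Int) :
    ∀ (I : List Int) (cnt : Int) (arr : List (List Int)),
    pvShape arr k → I.Nodup → (∀ i ∈ I, 0 ≤ i ∧ i < k) →
    ∃ arr',
      (I.foldl (fun st i => (PySem.List.pyRange (max (pvGet p 1) 0) (min (pvGet p 3) (k - 1) + 1) 1).foldl (fun st j =>
          if pvGetC st.2 i j == 0 then (st.1, pvSetC st.2 i j (pvGet p 4))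
          else if pvGetC st.2 i j + pvGet p 4 == 3 then (st.1 + 1, st.2)
          else st) st) (cnt, arr)
        = (I.foldl (fun t i => (PySem.List.pyRange (max (pvGet p 1) 0) (min (pvGet p 3) (k - 1) + 1) 1).foldl (fun t j => t + pvInc (pvGetC arr i j) (pvGet p 4)) t) cnt, arr'))
      ∧ pvShape arr' k
      ∧ (∀ i j, 0 ≤ i → i < k → 0 ≤ j → j < k →
          pvGetC arr' i j
            = if i ∈ I ∧ j ∈ PySem.List.pyRange (max (pvGet p 1) 0) (min (pvGet p 3) (k - 1) + 1) 1
              then pvUpd (pvGetC arr i j) (pvGet p 4) else pvGetC arr i j) := by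
  intro I
  induction I with
  | nil =>
    intro cnt arr hsh _ _
    exact ⟨arr, rfl, hsh, fun i j _ _ _ _ => by simp⟩
  | cons i I' ih =>
    intro cnt arr hsh hnd hb
    have hi := hb i (by simp)
    have hnd' := List.nodup_cons.mp hnd
    simp only [List.foldl_cons]
    obtain ⟨arr1, he1, hsh1, hrows1, hcells1⟩ := pvB_inner p i k
      (PySem.List.pyRange (max (pvGet p 1) 0) (min (pvGet p 3) (k - 1) + 1) 1) cnt arr
      hsh hi.1 hi.2 (PySem.List.nodup_pyRange_one _ _)
      (fun j hj => by have := PySem.List.mem_pyRange_one.mp hj; omega)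
    rw [he1]
    obtain ⟨arr', he2, hsh2, hcell2⟩ := ih
      ((PySem.List.pyRange (max (pvGet p 1) 0) (min (pvGet p 3) (k - 1) + 1) 1).foldl
        (fun t j => t + pvInc (pvGetC arr i j) (pvGet p 4)) cnt) arr1 hsh1 hnd'.2
      (fun i' h => hb i' (by simp [h]))
    have hrow_eq : ∀ i', i' ∈ I' → ∀ j, pvGetC arr1 i' j = pvGetC arr i' j := by
      intro i' hmem j
      have hne : i' ≠ i := fun heq => hnd'.1 (heq ▸ hmem)
      unfold pvGetC
      rw [hrows1 i' hne (hb i' (by simp [hmem])).1]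
    have hcnt : I'.foldl (fun t i' => (PySem.List.pyRange (max (pvGet p 1) 0) (min (pvGet p 3) (k - 1) + 1) 1).foldl
          (fun t j => t + pvInc (pvGetC arr1 i' j) (pvGet p 4)) t)
          ((PySem.List.pyRange (max (pvGet p 1) 0) (min (pvGet p 3) (k - 1) + 1) 1).foldl
            (fun t j => t + pvInc (pvGetC arr i j) (pvGet p 4)) cnt)
        = I'.foldl (fun t i' => (PySem.List.pyRange (max (pvGet p 1) 0) (min (pvGet p 3) (k - 1) + 1) 1).foldl
          (fun t j => t + pvInc (pvGetC arr i' j) (pvGet p 4)) t)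
          ((PySem.List.pyRange (max (pvGet p 1) 0) (min (pvGet p 3) (k - 1) + 1) 1).foldl
            (fun t j => t + pvInc (pvGetC arr i j) (pvGet p 4)) cnt) := by
      apply PySem.List.foldl_congr_mem
      intro acc x hx
      apply PySem.List.foldl_congr_mem
      intro acc2 j _
      rw [hrow_eq x hx j]
    refine ⟨arr', by rw [he2, hcnt], hsh2, ?_⟩
    intro i0 j0 hi0 hik0 hj0 hjk0
    rw [hcell2 i0 j0 hi0 hik0 hj0 hjk0]
    by_cases hii : i0 = i
    · subst hii
      have hnotI' : i0 ∉ I' := hnd'.1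
      rw [if_neg (by simp [hnotI'])]
      rw [hcells1 j0 hj0 hjk0]
      by_cases hj0J : j0 ∈ PySem.List.pyRange (max (pvGet p 1) 0) (min (pvGet p 3) (k - 1) + 1) 1
      · rw [if_pos hj0J, if_pos (by simp [hj0J])]
      · rw [if_neg hj0J, if_neg (by simp [hj0J])]
    · have h1 : pvGetC arr1 i0 j0 = pvGetC arr i0 j0 := by
        unfold pvGetC; rw [hrows1 i0 hii hi0]
      rw [h1]
      exact if_congr (by simp [hii]) rfl rfl

-- B's whole body for one square p, in summed form
theorem pvB_step (k : Int) (p : List Int) (cnt : Int) (arr : List (List Int)) (hsh : pvShape arr k) :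
    ∃ arr', pvStepB k (cnt, arr) p
        = (cnt + ((PySem.List.pyRange 0 k 1).map (fun i =>
            ((PySem.List.pyRange 0 k 1).map (fun j => pvIncC p i j (pvGetC arr i j))).sum)).sum, arr')
      ∧ pvShape arr' k
      ∧ (∀ i j, 0 ≤ i → i < k → 0 ≤ j → j < k →
          pvGetC arr' i j = pvUpdC p i j (pvGetC arr i j)) := by
  obtain ⟨arr', he, hsh', hcell⟩ := pvB_outer k p
    (PySem.List.pyRange (max (pvGet p 0) 0) (min (pvGet p 2) (k - 1) + 1) 1) cnt arr hsh
    (PySem.List.nodup_pyRange_one _ _)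
    (fun i hi => by have := PySem.List.mem_pyRange_one.mp hi; omega)
  refine ⟨arr', ?_, hsh', ?_⟩
  · unfold pvStepB
    rw [he, pv_grid2]
    have hin : ∀ i, ((PySem.List.pyRange (max (pvGet p 1) 0) (min (pvGet p 3) (k - 1) + 1) 1).map
          (fun j => pvInc (pvGetC arr i j) (pvGet p 4))).sum
        = ((PySem.List.pyRange 0 k 1).map
          (fun j => if pvGet p 1 ≤ j ∧ j ≤ pvGet p 3 then pvInc (pvGetC arr i j) (pvGet p 4) else 0)).sum :=
      fun i => pv_range_clamp k (pvGet p 1) (pvGet p 3) _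
    have hout : ((PySem.List.pyRange (max (pvGet p 0) 0) (min (pvGet p 2) (k - 1) + 1) 1).map
          (fun i => ((PySem.List.pyRange (max (pvGet p 1) 0) (min (pvGet p 3) (k - 1) + 1) 1).map
            (fun j => pvInc (pvGetC arr i j) (pvGet p 4))).sum)).sum
        = ((PySem.List.pyRange 0 k 1).map
          (fun i => if pvGet p 0 ≤ i ∧ i ≤ pvGet p 2 then
            ((PySem.List.pyRange (max (pvGet p 1) 0) (min (pvGet p 3) (k - 1) + 1) 1).map
              (fun j => pvInc (pvGetC arr i j) (pvGet p 4))).sum else 0)).sum :=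
      pv_range_clamp k (pvGet p 0) (pvGet p 2) _
    rw [hout]
    congr 1
    congr 1
    apply congrArg List.sum
    apply List.map_congr_left
    intro i _
    by_cases hr : pvGet p 0 ≤ i ∧ i ≤ pvGet p 2
    · rw [if_pos hr, hin i]
      apply congrArg List.sum
      apply List.map_congr_left
      intro j _
      rw [pvIncC_eq, if_pos hr]
    · rw [if_neg hr]
      have : ((PySem.List.pyRange 0 k 1).map (fun j => pvIncC p i j (pvGetC arr i j)))
          = (PySem.List.pyRange 0 k 1).map (fun _ => (0 : Int)) := by
        apply List.map_congr_left
        intro j _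
        rw [pvIncC_eq, if_neg hr]
      rw [this]
      simp
  · intro i j hi0 hik hj0 hjk
    rw [hcell i j hi0 hik hj0 hjk]
    unfold pvUpdC
    by_cases hc : pvCovers p i j
    · have hcv := (pv_covers_iff p i j).mp hc
      rw [if_pos hc, if_pos]
      exact ⟨PySem.List.mem_pyRange_one.mpr (by omega), PySem.List.mem_pyRange_one.mpr (by omega)⟩
    · rw [if_neg hc, if_neg]
      intro ⟨h1, h2⟩
      have h1' := PySem.List.mem_pyRange_one.mp h1
      have h2' := PySem.List.mem_pyRange_one.mp h2
      exact hc ((pv_covers_iff p i j).mpr (by omega))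

-- B's fold over the square list, against the per-cell semantics
theorem pvB_general (k : Int) :
    ∀ (squares : List (List Int)) (cnt : Int) (arr : List (List Int)), pvShape arr k →
    (squares.foldl (pvStepB k) (cnt, arr)).1
      = cnt + ((PySem.List.pyRange 0 k 1).map (fun i =>
          ((PySem.List.pyRange 0 k 1).map (fun j => pvCnt i j squares (pvGetC arr i j))).sum)).sum := by
  intro squares
  induction squares with
  | nil =>
    intro cnt arr _
    simp [pvCnt]
  | cons p ps ih =>
    intro cnt arr hsh
    obtain ⟨arr', he, hsh', hcell⟩ := pvB_step k p cnt arr hsh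
    simp only [List.foldl_cons]
    rw [he, ih _ arr' hsh']
    have h2 : ((PySem.List.pyRange 0 k 1).map (fun i =>
          ((PySem.List.pyRange 0 k 1).map (fun j => pvCnt i j ps (pvGetC arr' i j))).sum)).sum
        = ((PySem.List.pyRange 0 k 1).map (fun i =>
          ((PySem.List.pyRange 0 k 1).map (fun j => pvCnt i j ps (pvUpdC p i j (pvGetC arr i j)))).sum)).sum := by
      apply congrArg List.sum
      apply List.map_congr_left
      intro i hi
      apply congrArg List.sum
      apply List.map_congr_left
      intro j hj
      have hi' := PySem.List.mem_pyRange_one.mp hi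
      have hj' := PySem.List.mem_pyRange_one.mp hj
      rw [hcell i j hi'.1 hi'.2 hj'.1 hj'.2]
    rw [h2]
    have h4 : ((PySem.List.pyRange 0 k 1).map (fun i =>
          ((PySem.List.pyRange 0 k 1).map (fun j => pvCnt i j (p :: ps) (pvGetC arr i j))).sum)).sum
        = ((PySem.List.pyRange 0 k 1).map (fun i =>
            ((PySem.List.pyRange 0 k 1).map (fun j => pvIncC p i j (pvGetC arr i j))).sum
            + ((PySem.List.pyRange 0 k 1).map (fun j => pvCnt i j ps (pvUpdC p i j (pvGetC arr i j)))).sum)).sum := by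
      apply congrArg List.sum
      apply List.map_congr_left
      intro i _
      simp only [pvCnt]
      rw [pv_sum_map_add]
    rw [h4, pv_sum_map_add]
    ring

-- ===== VERDICT (by name: the statement is the Claim_ definition above) =====
theorem Painting_spec : Claim_equal_Painting := by
  unfold Claim_equal_Painting
  intro N squares k _ _
  unfold Spec_Painting
  by_cases hk : k ≤ 0
  · have hnil : PySem.List.pyRange 0 k 1 = [] :=
      List.eq_nil_of_length_eq_zero (by rw [PySem.List.length_pyRange_one]; omega)
    unfold Painting Painting_alt
    rw [if_pos hk, hnil]
    rfl
  have hsh : pvShape ((PySem.List.pyRange 0 k 1).map (fun _ => List.replicate k.toNat (0 : Int))) k := by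
    constructor
    · simp [PySem.List.length_pyRange_one]
    · intro row hr
      simp only [List.mem_map] at hr
      obtain ⟨_, _, rfl⟩ := hr
      simp
  have hzero : ∀ i ∈ PySem.List.pyRange 0 k 1, ∀ j, 0 ≤ j → j < k →
      pvGetC ((PySem.List.pyRange 0 k 1).map (fun _ => List.replicate k.toNat (0 : Int))) i j = 0 := by
    intro i hi j hj0 hjk
    have hik := PySem.List.mem_pyRange_one.mp hi
    unfold pvGetC
    rw [PySem.List.pyGetD_eq_getElem _ _ hik.1
        (by simp [PySem.List.length_pyRange_one]; omega)]
    simp only [List.getElem_map]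
    rw [PySem.List.pyGetD_of_nonneg _ _ hj0]
    simp [List.getD_eq_getElem?_getD, List.getElem?_replicate]
    split <;> rfl
  have hA : Painting N squares k
      = (PySem.List.pyRange 0 k 1).foldl (fun t i =>
          (PySem.List.pyRange 0 k 1).foldl (fun t j => t + pvCnt i j squares 0) t) 0 := by
    have hP : Painting N squares k
        = (((PySem.List.pyRange 0 k 1).foldl (fun st i =>
            (PySem.List.pyRange 0 k 1).foldl (fun st j => squares.foldl (pvStepA i j) st) st)
            ((0 : Int), (PySem.List.pyRange 0 k 1).map (fun _ => List.replicate k.toNat (0 : Int)))).1) := rfl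
    rw [hP, pv_outer squares k (PySem.List.pyRange 0 k 1) 0 _ hsh (PySem.List.nodup_pyRange_one 0 k)
        (fun i hi => by have := PySem.List.mem_pyRange_one.mp hi; exact ⟨this.1, this.2⟩)
        (fun i hi j hj0 hjk => hzero i hi j hj0 hjk)]
  have hB : Painting_alt N squares k
      = 0 + ((PySem.List.pyRange 0 k 1).map (fun i =>
          ((PySem.List.pyRange 0 k 1).map (fun j => pvCnt i j squares
            (pvGetC ((PySem.List.pyRange 0 k 1).map (fun _ => List.replicate k.toNat (0 : Int))) i j))).sum)).sum := by
    unfold Painting_alt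
    rw [if_neg hk]
    exact pvB_general k squares 0 _ hsh
  rw [hA, hB, pv_grid2]
  congr 1
  apply congrArg List.sum
  apply List.map_congr_left
  intro i hi
  apply congrArg List.sum
  apply List.map_congr_left
  intro j hj
  have hj' := PySem.List.mem_pyRange_one.mp hj
  rw [hzero i hi j hj'.1 hj'.2]
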